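-- pv_equiv track=rewrite | github.com/lukexyz/cartographer | community/dire_straits/calculate_layouts.py | get_ones
-- ===== SOURCE A (Python) =====
-- dimension = 8
--
-- def get_ones(n):
--
--     r = []
--
--     idx = 0
--     for c in reversed(bin(n)):
--         if c == '1':
--             r.append( (int(idx/dimension), idx % dimension) )
--         idx += 1
--
--     return r
-- ===== SOURCE B (Python) =====
-- dimension = 8
--
-- def get_ones(n):
--     m = abs(n)
--     idx = 0
--     r = []
--     while m:
--         if m & 1:
--             r.append((idx // dimension, idx % dimension))
--         m >>= 1
--         idx += 1
--     return r
-- ===== Notes on version B (the rewrite author's own statement) =====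
-- stated objective: idiomatic
-- what changed: B extracts bit positions arithmetically (while m: test m&1, shift right) instead of formatting n with bin() and scanning the reversed string character by character.
import Mathlib
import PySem

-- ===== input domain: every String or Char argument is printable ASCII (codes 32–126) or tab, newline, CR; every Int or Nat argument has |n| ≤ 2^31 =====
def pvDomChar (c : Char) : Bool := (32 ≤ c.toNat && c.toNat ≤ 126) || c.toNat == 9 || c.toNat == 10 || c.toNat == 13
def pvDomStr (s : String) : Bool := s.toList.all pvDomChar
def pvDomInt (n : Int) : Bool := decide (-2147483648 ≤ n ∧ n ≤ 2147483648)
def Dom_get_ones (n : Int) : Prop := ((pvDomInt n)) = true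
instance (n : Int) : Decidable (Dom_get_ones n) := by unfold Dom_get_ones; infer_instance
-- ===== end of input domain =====

-- B lists set-bit positions arithmetically (shift/mask) instead of scanning the reversed bin() string; objective: idiomatic.


-- ===== PORT A =====
-- binary digits of m (most significant first), empty for 0 — the digit part bin() prints for nonzero m
def pvBinCore (m : Nat) : List Char :=
  if m = 0 then [] else pvBinCore (m / 2) ++ [if m % 2 = 1 then '1' else '0']

-- full bin(n) as a character list: optional '-', then "0b", then digits ("0" for 0)
def pvBinChars (n : Int) : List Char :=
  (if n < 0 then ['-'] else []) ++ ['0', 'b'] ++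
    (if n = 0 then ['0'] else pvBinCore n.natAbs)

-- the for-loop over reversed(bin(n)) with counter idx and accumulator r
-- int(idx/8) = floor division here since idx ≥ 0 and small (float division exact)
def pvALoop (cs : List Char) (idx : Int) (r : List (Int × Int)) : List (Int × Int) :=
  match cs with
  | [] => r
  | c :: rest =>
      pvALoop rest (idx + 1)
        (if c = '1' then r ++ [(PySem.Int.floordiv idx 8, PySem.Int.mod idx 8)] else r)

def get_ones (n : Int) : List (Int × Int) :=
  pvALoop (pvBinChars n).reverse 0 []

-- ===== PORT B =====
-- while m: if m & 1: append (idx//8, idx%8); m >>= 1; idx += 1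
def pvBLoop (m : Nat) (idx : Int) : List (Int × Int) :=
  if m = 0 then []
  else (if m % 2 = 1 then [(PySem.Int.floordiv idx 8, PySem.Int.mod idx 8)] else [])
         ++ pvBLoop (m / 2) (idx + 1)

def get_ones_alt (n : Int) : List (Int × Int) :=
  pvBLoop n.natAbs 0

-- ===== PRECONDITION & SPEC =====
def Spec_get_ones (n : Int) (out : List (Int × Int)) : Prop := out = get_ones_alt n
instance (n : Int) (out : List (Int × Int)) : Decidable (Spec_get_ones n out) := by unfold Spec_get_ones; infer_instance

-- ===== CLAIM (what is proved, stated in full; the proofs are below) =====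
def Claim_equal_get_ones : Prop := ∀ (n : Int), Dom_get_ones n → Spec_get_ones n (get_ones n)

-- ===== LEMMAS AND PROOFS =====

theorem pvALoop_append (xs ys : List Char) (idx : Int) (r : List (Int × Int)) :
    pvALoop (xs ++ ys) idx r = pvALoop ys (idx + xs.length) (pvALoop xs idx r) := by
  induction xs generalizing idx r with
  | nil => simp [pvALoop]
  | cons c rest ih =>
      simp only [List.cons_append, pvALoop, ih, List.length_cons]
      congr 1
      push_cast
      ring

theorem pvALoop_no_one (cs : List Char) (idx : Int) (r : List (Int × Int))
    (h : ∀ c ∈ cs, c ≠ '1') : pvALoop cs idx r = r := by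
  induction cs generalizing idx with
  | nil => rfl
  | cons c rest ih =>
      simp only [pvALoop]
      rw [if_neg (by exact fun hc => h c (List.mem_cons_self) hc)]
      exact ih _ (fun d hd => h d (List.mem_cons_of_mem _ hd))

theorem pvALoop_binCore (m : Nat) (idx : Int) (r : List (Int × Int)) :
    pvALoop (pvBinCore m).reverse idx r = r ++ pvBLoop m idx := by
  induction m using Nat.strong_induction_on generalizing idx r with
  | _ m ih =>
    by_cases h : m = 0
    · subst h; simp [pvBinCore, pvALoop, pvBLoop]
    · rw [pvBinCore, if_neg h, pvBLoop, if_neg h]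
      rw [List.reverse_append]
      simp only [List.reverse_singleton, List.singleton_append, pvALoop]
      rw [ih (m / 2) (Nat.div_lt_self (Nat.pos_of_ne_zero h) (by omega))]
      by_cases hm : m % 2 = 1
      · simp [hm, List.append_assoc]
      · simp [hm]

-- ===== VERDICT (by name: the statement is the Claim_ definition above) =====
theorem get_ones_spec : Claim_equal_get_ones := by
  intro n _
  show get_ones n = get_ones_alt n
  unfold get_ones get_ones_alt
  by_cases h0 : n = 0
  · subst h0
    have h1 : (pvBinChars 0).reverse = ['0', 'b', '0'] := by simp [pvBinChars]
    rw [h1, pvALoop_no_one _ _ _ (by intro c hc; fin_cases hc <;> decide), pvBLoop]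
    simp
  · have h2 : (pvBinChars n).reverse =
        (pvBinCore n.natAbs).reverse ++ (['b', '0'] ++ (if n < 0 then ['-'] else [])) := by
      unfold pvBinChars
      rw [if_neg h0]
      by_cases hn : n < 0 <;> simp [hn]
    rw [h2, pvALoop_append, pvALoop_binCore, pvALoop_no_one]
    · simp
    · intro c hc
      by_cases hn : n < 0 <;>
        simp only [hn, ite_true, ite_false, List.append_nil, List.mem_append,
          List.mem_cons, List.not_mem_nil, or_false] at hc
      · rcases hc with (rfl | rfl) | rfl <;> decide
      · rcases hc with rfl | rfl <;> decide
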